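-- pv_equiv track=rewrite | github.com/t4dokiary/RI-T3 | src/hash.py | crear_tabla_hash_verbose
-- ===== SOURCE A (Python) =====
-- def custom_hash_with_position_verbose(word):
--     """
--     Calcula el hash de la palabra dada con la posición de cada carácter en la palabra.
--     Retorna el valor del hash y una expresión que muestra los pasos del cálculo.
--     """
--     hash_val = 0
--     hash_steps = []
--     for i, char in enumerate(word):
--         step = f"{ord(char)}^{i + 1}"
--         hash_steps.append(step)
--         hash_val += ord(char) ** (i + 1)
--     hash_expression = '+'.join(hash_steps)
--     return hash_val, hash_expression
--
-- def crear_tabla_hash_verbose(lista_palabras, tamano_tabla):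
--     tabla_hash = {}
--     for palabra in lista_palabras:
--         hash_val, hash_expression = custom_hash_with_position_verbose(palabra)
--         indice = hash_val % tamano_tabla
--         if indice not in tabla_hash:
--             tabla_hash[indice] = []
--         tabla_hash[indice].append(palabra)
--
--     # Crear una lista de celdas que contenga las listas de palabras o valores nulos si la celda está vacía
--     celdas_ordenadas = [None] * tamano_tabla
--     for clave, valor in tabla_hash.items():
--         celdas_ordenadas[clave] = valor
--
--     return celdas_ordenadas
-- ===== SOURCE B (Python) =====
-- def crear_tabla_hash_verbose(lista_palabras, tamano_tabla):
--     # Bucket-by-bucket construction: hash every word once, then build each cell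
--     # j of the table directly as the sublist of words whose key equals j
--     # (None when that sublist is empty). No dict, no scatter pass.
--     claves = [sum(ord(c) ** (i + 1) for i, c in enumerate(p)) % tamano_tabla
--               for p in lista_palabras]
--     celdas = []
--     for j in range(tamano_tabla):
--         cubeta = [p for k, p in zip(claves, lista_palabras) if k == j]
--         celdas.append(cubeta if cubeta else None)
--     return celdas
-- ===== Notes on version B (the rewrite author's own statement) =====
-- stated objective: alternative
-- what changed: Replaces A's word-by-word scatter (group words into a dict keyed by hash index, then copy the dict into a preallocated list) by a bucket-by-bucket construction: hash every word once, then build each table cell j directly as the sublist of words whose key equals j (None when empty); no dict and no scatter pass, at the cost of scanning the key list once per cell.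
import Mathlib
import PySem

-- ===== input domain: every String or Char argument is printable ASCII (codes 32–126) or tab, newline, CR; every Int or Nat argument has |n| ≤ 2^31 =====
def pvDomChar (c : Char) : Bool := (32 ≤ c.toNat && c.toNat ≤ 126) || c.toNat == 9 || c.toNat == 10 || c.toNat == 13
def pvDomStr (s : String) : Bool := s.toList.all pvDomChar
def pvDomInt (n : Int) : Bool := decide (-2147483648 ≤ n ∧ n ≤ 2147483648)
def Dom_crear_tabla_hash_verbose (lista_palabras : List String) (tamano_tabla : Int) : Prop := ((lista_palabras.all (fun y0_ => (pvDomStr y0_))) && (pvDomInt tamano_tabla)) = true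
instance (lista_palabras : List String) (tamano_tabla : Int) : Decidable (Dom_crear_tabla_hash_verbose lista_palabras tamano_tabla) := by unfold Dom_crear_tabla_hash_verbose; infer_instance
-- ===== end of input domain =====

-- B builds the table bucket-by-bucket (each cell j is the sublist of words whose key is j,
-- None when empty) instead of A's word-by-word scatter through an intermediate dict:
-- an alternative construction of the same table, not claimed faster.

-- ===== PORT A =====
def custom_hash_with_position_verbose (word : String) : Int × String :=
  let st := (PySem.List.enumerate word.toList 0).foldl
    (fun (acc : Int × List String) (p : Int × Char) =>
      (acc.1 + ((p.2.toNat : Int)) ^ (p.1 + 1).toNat,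
       acc.2 ++ [PySem.Int.toStr (p.2.toNat : Int) ++ "^" ++ PySem.Int.toStr (p.1 + 1)]))
    ((0 : Int), ([] : List String))
  (st.1, PySem.Str.join "+" st.2)

def crear_tabla_hash_verbose (lista_palabras : List String) (tamano_tabla : Int) : List (Option (List String)) :=
  let tabla := lista_palabras.foldl
    (fun (d : PySem.Dict Int (List String)) palabra =>
      let indice := PySem.Int.mod (custom_hash_with_position_verbose palabra).1 tamano_tabla
      -- "if indice not in tabla: tabla[indice] = []" then append, i.e. d[indice] = d.get(indice, []) + [palabra]
      d.modify indice [] (fun l => l ++ [palabra]))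
    PySem.Dict.empty
  tabla.items.foldl
    (fun cel (p : Int × List String) => PySem.List.pySetD cel p.1 (some p.2))
    (List.replicate tamano_tabla.toNat none)

-- ===== PORT B =====
def crear_tabla_hash_verbose_alt (lista_palabras : List String) (tamano_tabla : Int) : List (Option (List String)) :=
  -- claves = [sum(ord(c)**(i+1) for i,c in enumerate(p)) % tamano_tabla for p in lista_palabras]
  let claves := lista_palabras.map (fun p =>
    PySem.Int.mod ((PySem.List.enumerate p.toList 0).foldl
      (fun (h : Int) (q : Int × Char) => h + ((q.2.toNat : Int)) ^ (q.1 + 1).toNat) 0) tamano_tabla)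
  -- for j in range(tamano_tabla): cubeta = [p for k,p in zip(claves, lista) if k == j]; append(cubeta or None)
  (PySem.List.pyRange 0 tamano_tabla 1).foldl
    (fun cel j =>
      let cubeta := ((claves.zip lista_palabras).filter (fun kp => kp.1 == j)).map Prod.snd
      cel ++ [if cubeta.isEmpty then none else some cubeta]) []

-- ===== PRECONDITION & SPEC =====
-- Pre_ excludes exactly the inputs where the Python A raises: with a nonempty word list and
-- tamano_tabla = 0 A raises ZeroDivisionError, and with tamano_tabla < 0 it raises IndexError
-- (the preallocated list is empty while the index assignment still runs).
def Pre_crear_tabla_hash_verbose (lista_palabras : List String) (tamano_tabla : Int) : Prop :=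
  0 < tamano_tabla ∨ lista_palabras = []
instance (lista_palabras : List String) (tamano_tabla : Int) : Decidable (Pre_crear_tabla_hash_verbose lista_palabras tamano_tabla) := by unfold Pre_crear_tabla_hash_verbose; infer_instance

def pvWitness_crear_tabla_hash_verbose : List String × Int := (["ab", "c", "x"], 3)

def Spec_crear_tabla_hash_verbose (lista_palabras : List String) (tamano_tabla : Int) (out : List (Option (List String))) : Prop := out = crear_tabla_hash_verbose_alt lista_palabras tamano_tabla
instance (lista_palabras : List String) (tamano_tabla : Int) (out : List (Option (List String))) : Decidable (Spec_crear_tabla_hash_verbose lista_palabras tamano_tabla out) := by unfold Spec_crear_tabla_hash_verbose; infer_instance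

-- ===== CLAIM (what is proved, stated in full; the proofs are below) =====
def Claim_equal_crear_tabla_hash_verbose : Prop := ∀ (lista_palabras : List String) (tamano_tabla : Int), Dom_crear_tabla_hash_verbose lista_palabras tamano_tabla → Pre_crear_tabla_hash_verbose lista_palabras tamano_tabla → Spec_crear_tabla_hash_verbose lista_palabras tamano_tabla (crear_tabla_hash_verbose lista_palabras tamano_tabla)

-- ===== LEMMAS AND PROOFS =====

-- the positional power-sum hash, the bucket index of a word, and the bucket contents of an index
def hashOf (word : String) : Int :=
  (PySem.List.enumerate word.toList 0).foldl
    (fun (h : Int) (p : Int × Char) => h + ((p.2.toNat : Int)) ^ (p.1 + 1).toNat) 0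
def keyOf (t : Int) (w : String) : Int := PySem.Int.mod (hashOf w) t
def bucket (ws : List String) (t : Int) (j : Int) : List String :=
  ws.filter (fun w => keyOf t w == j)

theorem hash_fst (w : String) : (custom_hash_with_position_verbose w).1 = hashOf w := by
  show ((PySem.List.enumerate w.toList 0).foldl
    (fun (acc : Int × List String) (p : Int × Char) =>
      (acc.1 + ((p.2.toNat : Int)) ^ (p.1 + 1).toNat,
       acc.2 ++ [PySem.Int.toStr (p.2.toNat : Int) ++ "^" ++ PySem.Int.toStr (p.1 + 1)]))
    ((0 : Int), ([] : List String))).1 = hashOf w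
  rw [PySem.List.foldl_prod_mk
        (f := fun (h : Int) (p : Int × Char) => h + ((p.2.toNat : Int)) ^ (p.1 + 1).toNat)
        (g := fun (s : List String) (p : Int × Char) =>
          s ++ [PySem.Int.toStr (p.2.toNat : Int) ++ "^" ++ PySem.Int.toStr (p.1 + 1)])]
  rfl

-- A's grouping dict, with the hash helper's first component rewritten to hashOf
def dictOf (ws : List String) (t : Int) : PySem.Dict Int (List String) :=
  ws.foldl (fun d w => d.modify (keyOf t w) [] (fun l => l ++ [w])) PySem.Dict.empty

theorem dictOf_keys (ws : List String) (t : Int) :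
    (dictOf ws t).keys = PySem.Set.update [] (ws.map (keyOf t)) := by
  unfold dictOf
  rw [PySem.Dict.keys_foldl_modify_key ws (keyOf t) [] (fun _ w => fun l => l ++ [w])]
  rfl

theorem dictOf_nodup (ws : List String) (t : Int) : (dictOf ws t).keys.Nodup := by
  unfold dictOf
  exact PySem.Dict.nodup_keys_foldl_modify_key ws (keyOf t) [] _ _ (by simp)

theorem dictOf_getD (ws : List String) (t : Int) (j : Int) :
    (dictOf ws t).getD j [] = bucket ws t j := by
  unfold dictOf bucket
  rw [show (fun (d : PySem.Dict Int (List String)) w => d.modify (keyOf t w) [] (fun l => l ++ [w]))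
        = fun d w => (fun d (p : Int × String) => PySem.Dict.modify d p.1 [] (fun l => l ++ [p.2])) d (keyOf t w, w) from rfl]
  rw [← List.foldl_map (f := fun w => ((keyOf t w, w) : Int × String))
        (g := fun (d : PySem.Dict Int (List String)) (p : Int × String) =>
          PySem.Dict.modify d p.1 [] (fun l => l ++ [p.2]))]
  rw [PySem.Dict.getD_foldl_modify_append]
  simp [List.filter_map, Function.comp_def]

theorem mem_keys_iff (ws : List String) (t : Int) (j : Int) :
    j ∈ (dictOf ws t).keys ↔ bucket ws t j ≠ [] := by
  rw [dictOf_keys]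
  rw [PySem.Set.mem_update]
  simp only [List.mem_nil_iff, false_or, List.mem_map]
  unfold bucket
  rw [ne_eq, List.filter_eq_nil_iff]
  push Not
  constructor
  · rintro ⟨w, hw, rfl⟩; exact ⟨w, hw, by simp⟩
  · rintro ⟨w, hw, h⟩; exact ⟨w, hw, by simpa using h⟩

theorem find?_beq_of_mem (l : List Int) (a : Int) (h : a ∈ l) :
    l.find? (fun x => x == a) = some a := by
  induction l with
  | nil => simp at h
  | cons b l ih =>
    rcases List.mem_cons.mp h with rfl | h'
    · simp
    · by_cases hb : b = a
      · subst hb; simp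
      · rw [List.find?_cons_of_neg (by simpa using hb)]
        exact ih h'

theorem scatter_not_mem (l : List (Int × List String)) (s : List (Option (List String))) (j : Nat)
    (hpos : ∀ p ∈ l, 0 ≤ p.1) (h : (j : Int) ∉ l.map Prod.fst) :
    (l.foldl (fun cel p => PySem.List.pySetD cel p.1 (some p.2)) s)[j]? = s[j]? := by
  induction l generalizing s with
  | nil => rfl
  | cons p l ih =>
    simp only [List.map_cons, List.mem_cons, not_or] at h
    simp only [List.foldl_cons]
    rw [ih _ (fun q hq => hpos q (List.mem_cons_of_mem _ hq)) h.2]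
    rw [PySem.List.pySetD_of_nonneg _ _ (hpos p (List.mem_cons_self))]
    exact List.getElem?_set_ne (by
      have h0 := hpos p (List.mem_cons_self)
      intro hc; exact h.1 (by omega))

theorem scatter_get (l : List (Int × List String)) (s : List (Option (List String))) (j : Nat)
    (hnd : (l.map Prod.fst).Nodup) (hpos : ∀ p ∈ l, 0 ≤ p.1 ∧ p.1.toNat < s.length) :
    (l.foldl (fun cel p => PySem.List.pySetD cel p.1 (some p.2)) s)[j]? =
      match l.find? (fun p => p.1 == (j : Int)) with
      | some p => some (some p.2)
      | none => s[j]? := by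
  induction l generalizing s with
  | nil => rfl
  | cons p l ih =>
    have hp := hpos p (List.mem_cons_self)
    simp only [List.map_cons, List.nodup_cons] at hnd
    have hpos' : ∀ q ∈ l, 0 ≤ q.1 ∧ q.1.toNat < (PySem.List.pySetD s p.1 (some p.2)).length := by
      intro q hq
      rw [PySem.List.length_pySetD]
      exact hpos q (List.mem_cons_of_mem _ hq)
    by_cases hj : p.1 = (j : Int)
    · rw [List.find?_cons_of_pos (by simpa using hj)]
      simp only [List.foldl_cons]
      rw [scatter_not_mem _ _ _ (fun q hq => (hpos q (List.mem_cons_of_mem _ hq)).1)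
          (by rw [← hj]; exact hnd.1)]
      rw [PySem.List.pySetD_of_nonneg _ _ hp.1]
      have hidx : p.1.toNat = j := by omega
      rw [hidx, List.getElem?_set_self (by omega)]
    · rw [List.find?_cons_of_neg (by simpa using hj)]
      simp only [List.foldl_cons]
      rw [ih _ hnd.2 hpos']
      cases hfind : l.find? (fun q => q.1 == (j : Int)) with
      | some q => rfl
      | none =>
        simp only
        rw [PySem.List.pySetD_of_nonneg _ _ hp.1]
        exact List.getElem?_set_ne (by intro hc; exact hj (by omega))

-- A's whole result, cell by cell
theorem A_getElem? (ws : List String) (t : Int) (ht : 0 < t) (j : Nat) :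
    (crear_tabla_hash_verbose ws t)[j]? =
      if bucket ws t (j : Int) = [] then (List.replicate t.toNat (none : Option (List String)))[j]?
      else some (some (bucket ws t (j : Int))) := by
  have hA : crear_tabla_hash_verbose ws t =
      (dictOf ws t).items.foldl
        (fun cel p => PySem.List.pySetD cel p.1 (some p.2))
        (List.replicate t.toNat none) := by
    unfold crear_tabla_hash_verbose dictOf
    simp only [hash_fst]
    rfl
  rw [hA]
  have hnd := dictOf_nodup ws t
  have hitems := PySem.Dict.items_eq_map_keys (dictOf ws t) hnd []
  have hkey_mem : ∀ k ∈ (dictOf ws t).keys, 0 ≤ k ∧ k < t := by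
    intro k hk
    have : bucket ws t k ≠ [] := (mem_keys_iff ws t k).1 hk
    unfold bucket at this
    rw [ne_eq, List.filter_eq_nil_iff] at this
    push Not at this
    obtain ⟨w, _, hw⟩ := this
    have : keyOf t w = k := by simpa using hw
    subst this
    exact ⟨PySem.Int.mod_nonneg _ ht, PySem.Int.mod_lt _ ht⟩
  rw [scatter_get]
  · rw [hitems, List.find?_map]
    by_cases hmem : (j : Int) ∈ (dictOf ws t).keys
    · rw [show ((fun (p : Int × List String) => p.1 == (j : Int)) ∘ (fun k => (k, (dictOf ws t).getD k []))) = fun k => k == (j : Int) from rfl]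
      rw [find?_beq_of_mem _ _ hmem]
      have hb : bucket ws t (j : Int) ≠ [] := (mem_keys_iff ws t _).1 hmem
      simp [hb, dictOf_getD]
    · rw [show ((fun (p : Int × List String) => p.1 == (j : Int)) ∘ (fun k => (k, (dictOf ws t).getD k []))) = fun k => k == (j : Int) from rfl]
      rw [List.find?_eq_none.2 (by intro k hk; simp; rintro rfl; exact hmem hk)]
      have hb : bucket ws t (j : Int) = [] := by
        by_contra hc
        exact hmem ((mem_keys_iff ws t _).2 hc)
      simp [hb]
  · rw [hitems, List.map_map]
    simpa [Function.comp_def] using hnd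
  · intro p hp
    rw [hitems] at hp
    simp only [List.mem_map] at hp
    obtain ⟨k, hk, rfl⟩ := hp
    have := hkey_mem k hk
    constructor
    · exact this.1
    · rw [List.length_replicate]; omega

-- B-side: the per-cell comprehension over (claves, word) pairs IS the bucket of that cell
theorem cubeta_eq (ws : List String) (t : Int) (j : Int) :
    (((ws.map (keyOf t)).zip ws).filter (fun kp => kp.1 == j)).map Prod.snd = bucket ws t j := by
  induction ws with
  | nil => rfl
  | cons w ws ih =>
    unfold bucket
    show (((keyOf t w, w) :: ((ws.map (keyOf t)).zip ws)).filter (fun kp => kp.1 == j)).map Prod.snd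
        = (w :: ws).filter (fun w => keyOf t w == j)
    by_cases h : keyOf t w = j
    · rw [List.filter_cons_of_pos (by simp [h]), List.map_cons,
          List.filter_cons_of_pos (by simp [h]), ih]
      rfl
    · rw [List.filter_cons_of_neg (by simp [h]),
          List.filter_cons_of_neg (by simp [h]), ih]
      rfl

-- B's fold over range(t) appending one cell per index is a map over the range
theorem B_eq_map (ws : List String) (t : Int) :
    crear_tabla_hash_verbose_alt ws t =
      (PySem.List.pyRange 0 t 1).map
        (fun j => if (bucket ws t j).isEmpty then none else some (bucket ws t j)) := by
  show (PySem.List.pyRange 0 t 1).foldl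
      (fun cel j =>
        let cubeta := (((ws.map (fun p => PySem.Int.mod (hashOf p) t)).zip ws).filter
          (fun kp => kp.1 == j)).map Prod.snd
        cel ++ [if cubeta.isEmpty then none else some cubeta]) [] = _
  rw [PySem.List.foldl_append_singleton_eq_map]
  refine List.map_congr_left (fun j _ => ?_)
  have : ((ws.map (fun p => PySem.Int.mod (hashOf p) t)) : List Int) = ws.map (keyOf t) := rfl
  simp only [this, cubeta_eq]

-- B's whole result, cell by cell
theorem B_getElem? (ws : List String) (t : Int) (j : Nat) :
    (crear_tabla_hash_verbose_alt ws t)[j]? =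
      if j < t.toNat then
        some (if (bucket ws t (j : Int)).isEmpty then none else some (bucket ws t (j : Int)))
      else none := by
  rw [B_eq_map]
  by_cases hj : j < t.toNat
  · rw [List.getElem?_map, List.getElem?_eq_getElem (by
      rw [PySem.List.length_pyRange_one]; omega)]
    rw [if_pos hj, PySem.List.getElem_pyRange_one]
    simp
  · rw [if_neg hj, List.getElem?_map, List.getElem?_eq_none (by
      rw [PySem.List.length_pyRange_one]; omega)]
    rfl

-- ===== VERDICT (by name: the statement is the Claim_ definition above) =====
theorem crear_tabla_hash_verbose_spec : Claim_equal_crear_tabla_hash_verbose := by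
  intro ws t _ hpre
  unfold Spec_crear_tabla_hash_verbose
  have hmain : 0 < t → crear_tabla_hash_verbose ws t = crear_tabla_hash_verbose_alt ws t := by
    intro ht
    apply List.ext_getElem?
    intro j
    rw [A_getElem? ws t ht j, B_getElem? ws t j]
    by_cases hj : j < t.toNat
    · by_cases hb : bucket ws t (j : Int) = []
      · simp [hb, hj]
      · simp [hb, hj, List.isEmpty_iff]
    · have hb : bucket ws t (j : Int) = [] := by
        by_contra hc
        unfold bucket at hc
        rw [List.filter_eq_nil_iff] at hc
        push Not at hc
        obtain ⟨w, _, hkw⟩ := hc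
        have h2 := PySem.Int.mod_lt (hashOf w) ht
        have h1 := PySem.Int.mod_nonneg (hashOf w) ht
        have : keyOf t w = (j : Int) := by simpa using hkw
        unfold keyOf at this
        omega
      simp [hb, hj]
  rcases hpre with ht | rfl
  · exact hmain ht
  · by_cases ht : 0 < t
    · exact hmain ht
    · have hA : crear_tabla_hash_verbose [] t = List.replicate t.toNat none := rfl
      rw [hA, B_eq_map]
      have hb : ∀ j, bucket [] t j = [] := fun _ => rfl
      simp only [hb, List.isEmpty_nil, if_true]
      rw [List.map_const']
      rw [PySem.List.length_pyRange_one]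
      congr 1
      omega
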